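-- pv_equiv track=rewrite | github.com/mingzhong15/extrempy | extrempy/dpsample.py | split_temperature_range
-- ===== SOURCE A (Python) =====
-- def split_temperature_range(T_list, delta_T):
--     """
--     将温度列表按照给定的温度间隔划分成多个子列表
--
--     参数:
--     T_list: 原始温度列表
--     delta_T: 温度区间大小
--
--     返回:
--     list of lists: 划分后的温度区间列表
--     """
--     if not T_list:
--         return []
--
--     # 确保温度列表是排序的
--     T_list = sorted(T_list)
--     T_ranges = []
--     current_range = []
--
--     for temp in T_list:
--         if not current_range:
--             current_range.append(temp)
--         elif temp - current_range[0] <= delta_T: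
--             current_range.append(temp)
--         else:
--             T_ranges.append(current_range)
--             current_range = [temp]
--
--     if current_range:
--         T_ranges.append(current_range)
--
--     return T_ranges
-- ===== SOURCE B (Python) =====
-- def split_temperature_range(T_list, delta_T):
--     T = sorted(T_list)
--     ranges = []
--     i = 0
--     n = len(T)
--     while i < n:
--         anchor = T[i]
--         j = i + 1
--         while j < n and T[j] - anchor <= delta_T:
--             j += 1
--         ranges.append(T[i:j])
--         i = j
--     return ranges
-- ===== Notes on version B (the rewrite author's own statement) =====
-- stated objective: simpler
-- what changed: Replaces A's single element-by-element fold with accumulator-and-flush state (T_ranges, current_range) by a per-bucket walk over the sorted list: take the element at the current index as anchor, scan off the whole bucket as one slice, and jump to the next bucket start.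
import Mathlib
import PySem

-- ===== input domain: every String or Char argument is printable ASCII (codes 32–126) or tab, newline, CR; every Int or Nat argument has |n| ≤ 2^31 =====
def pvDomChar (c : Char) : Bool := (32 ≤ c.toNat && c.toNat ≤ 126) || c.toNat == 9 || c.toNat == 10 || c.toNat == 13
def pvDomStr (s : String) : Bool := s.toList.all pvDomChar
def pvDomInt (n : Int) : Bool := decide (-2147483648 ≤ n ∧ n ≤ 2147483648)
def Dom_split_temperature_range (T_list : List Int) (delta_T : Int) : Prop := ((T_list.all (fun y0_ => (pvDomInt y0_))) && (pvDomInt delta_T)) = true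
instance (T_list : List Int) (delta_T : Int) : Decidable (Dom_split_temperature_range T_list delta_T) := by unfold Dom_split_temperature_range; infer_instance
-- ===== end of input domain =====

-- B replaces A's single fold with (ranges, current_range) state by a per-bucket span recursion: simpler decomposition, same result.


-- ===== PORT A =====
-- the loop body of A: state = (T_ranges, current_range)
def stepA (delta_T : Int) (st : List (List Int) × List Int) (temp : Int) : List (List Int) × List Int :=
  if st.2 = [] then (st.1, st.2 ++ [temp])
  else if temp - st.2.headD 0 ≤ delta_T then (st.1, st.2 ++ [temp])
  else (st.1 ++ [st.2], [temp])

def split_temperature_range (T_list : List Int) (delta_T : Int) : List (List Int) :=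
  if T_list = [] then []
  else
    let T := PySem.List.sorted T_list (fun x => x)
    let st := T.foldl (stepA delta_T) ([], [])
    if st.2 ≠ [] then st.1 ++ [st.2] else st.1

-- ===== PORT B =====
-- Source B's inner 'go': anchor = head, the while loop scans off the bucket (a prefix), recurse on the rest
def altGo (delta_T : Int) : List Int → List (List Int)
  | [] => []
  | anchor :: rest =>
    (anchor :: rest.takeWhile (fun x => x - anchor ≤ delta_T)) ::
      altGo delta_T (rest.dropWhile (fun x => x - anchor ≤ delta_T))
termination_by l => l.length
decreasing_by
  simpa [Nat.lt_succ_iff] using List.length_dropWhile_le (l := rest) (p := fun x => decide (x - anchor ≤ delta_T))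

def split_temperature_range_alt (T_list : List Int) (delta_T : Int) : List (List Int) :=
  altGo delta_T (PySem.List.sorted T_list (fun x => x))

-- ===== PRECONDITION & SPEC =====
def Spec_split_temperature_range (T_list : List Int) (delta_T : Int) (out : List (List Int)) : Prop := out = split_temperature_range_alt T_list delta_T
instance (T_list : List Int) (delta_T : Int) (out : List (List Int)) : Decidable (Spec_split_temperature_range T_list delta_T out) := by unfold Spec_split_temperature_range; infer_instance

-- ===== CLAIM (what is proved, stated in full; the proofs are below) =====
def Claim_equal_split_temperature_range : Prop := ∀ (T_list : List Int) (delta_T : Int), Dom_split_temperature_range T_list delta_T → Spec_split_temperature_range T_list delta_T (split_temperature_range T_list delta_T)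

-- ===== LEMMAS AND PROOFS =====

-- A's final flush
def flushA (st : List (List Int) × List Int) : List (List Int) :=
  if st.2 ≠ [] then st.1 ++ [st.2] else st.1

-- buckets produced from an open bucket (anchor a, further elements cs) followed by input l
def goMid (delta_T a : Int) (cs : List Int) : List Int → List (List Int)
  | l =>
    match h : l.dropWhile (fun x => x - a ≤ delta_T) with
    | [] => [a :: (cs ++ l.takeWhile (fun x => x - a ≤ delta_T))]
    | b :: r' =>
      (a :: (cs ++ l.takeWhile (fun x => x - a ≤ delta_T))) :: goMid delta_T b [] r'
termination_by l => l.length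
decreasing_by
  have hle := List.length_dropWhile_le (l := l) (p := fun x => decide (x - a ≤ delta_T))
  rw [h] at hle
  simpa using Nat.lt_of_lt_of_le (Nat.lt_succ_self _) hle

lemma goMid_nil (d a : Int) (cs : List Int) : goMid d a cs [] = [a :: cs] := by
  simp [goMid]

lemma goMid_cons_pos (d a x : Int) (cs l : List Int) (h : x - a ≤ d) :
    goMid d a cs (x :: l) = goMid d a (cs ++ [x]) l := by
  rw [goMid, goMid,
    List.dropWhile_cons_of_pos (by simpa using h),
    List.takeWhile_cons_of_pos (by simpa using h)]
  cases hdw : l.dropWhile (fun x => decide (x - a ≤ d)) <;> simp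

lemma goMid_cons_neg (d a x : Int) (cs l : List Int) (h : ¬ x - a ≤ d) :
    goMid d a cs (x :: l) = (a :: cs) :: goMid d x [] l := by
  rw [goMid,
    List.dropWhile_cons_of_neg (by simpa using h),
    List.takeWhile_cons_of_neg (by simpa using h)]
  simp

lemma foldA_flush (d : Int) :
    ∀ (l : List Int) (rs : List (List Int)) (a : Int) (cs : List Int),
      flushA (l.foldl (stepA d) (rs, a :: cs)) = rs ++ goMid d a cs l := by
  intro l
  induction l with
  | nil => intro rs a cs; simp [flushA, goMid_nil]
  | cons x l ih =>
    intro rs a cs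
    by_cases h : x - a ≤ d
    · rw [goMid_cons_pos d a x cs l h]
      have : stepA d (rs, a :: cs) x = (rs, a :: (cs ++ [x])) := by
        simp [stepA, h]
      simp only [List.foldl_cons, this, ih]
    · rw [goMid_cons_neg d a x cs l h]
      have : stepA d (rs, a :: cs) x = (rs ++ [a :: cs], [x]) := by
        simp [stepA, h]
      simp only [List.foldl_cons, this]
      rw [ih]
      simp

lemma altGo_eq_goMid_aux (d : Int) :
    ∀ (n : Nat) (l : List Int), l.length ≤ n → ∀ a, altGo d (a :: l) = goMid d a [] l := by
  intro n
  induction n with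
  | zero =>
    intro l hl a
    have hnil : l = [] := List.eq_nil_of_length_eq_zero (Nat.le_zero.mp hl)
    subst hnil
    simp [altGo, goMid_nil]
  | succ n ih =>
    intro l hl a
    rw [altGo, goMid]
    cases hdw : l.dropWhile (fun x => decide (x - a ≤ d)) with
    | nil => simp [altGo]
    | cons b r' =>
      have hlen : r'.length ≤ n := by
        have hle := List.length_dropWhile_le (l := l) (p := fun x => decide (x - a ≤ d))
        rw [hdw] at hle
        simp only [List.length_cons] at hle
        omega
      rw [ih r' hlen b]
      simp

lemma altGo_eq_goMid (d : Int) (l : List Int) (a : Int) :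
    altGo d (a :: l) = goMid d a [] l :=
  altGo_eq_goMid_aux d l.length l le_rfl a

theorem split_temperature_range_spec : Claim_equal_split_temperature_range := by
  intro T_list delta_T _
  unfold Spec_split_temperature_range split_temperature_range split_temperature_range_alt
  by_cases hT : T_list = []
  · simp [hT, PySem.List.sorted, altGo]
  · simp only [hT, ite_false]
    cases hS : PySem.List.sorted T_list (fun x => x) with
    | nil => exact absurd ((PySem.List.sorted_eq_nil_iff T_list (fun x => x) false).mp hS) hT
    | cons a rest =>
      show flushA ((a :: rest).foldl (stepA delta_T) ([], [])) = altGo delta_T (a :: rest)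
      have h1 : stepA delta_T ([], []) a = ([], [a]) := by simp [stepA]
      rw [List.foldl_cons, h1, foldA_flush, altGo_eq_goMid]
      simp
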